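-- pv_equiv track=rewrite | github.com/angelleano/chesspy | data/classes/Board.py | get_coordinates_between
-- ===== SOURCE A (Python) =====
-- def get_coordinates_between(start, end):
--
--     start_x, start_y = start
--     end_x, end_y = end
--
--     # Calculate the direction of the line
--     dx = end_x - start_x
--     dy = end_y - start_y
--
--     # Ensure that the line is diagonal or horizontal/vertical
--     if abs(dx) != abs(dy) and dx != 0 and dy != 0:
--         return None
--
--     # Determine the step size for x and y
--     step_x = 1 if dx > 0 else -1 if dx < 0 else 0
--     step_y = 1 if dy > 0 else -1 if dy < 0 else 0
--
--     coordinates = []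
--     start_x += step_x
--     start_y += step_y
--     x, y = start_x, start_y
--
--     while x != end_x or y != end_y:
--         coordinates.append((x, y))
--         x += step_x
--         y += step_y
--
--     return coordinates
-- ===== SOURCE B (Python) =====
-- def get_coordinates_between(start, end):
--     start_x, start_y = start
--     end_x, end_y = end
--     dx = end_x - start_x
--     dy = end_y - start_y
--     if abs(dx) != abs(dy) and dx != 0 and dy != 0:
--         return None
--     n = max(abs(dx), abs(dy))
--     xs = range(start_x, end_x, 1 if dx > 0 else -1) if dx != 0 else [start_x] * n
--     ys = range(start_y, end_y, 1 if dy > 0 else -1) if dy != 0 else [start_y] * n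
--     return list(zip(xs, ys))[1:]
-- ===== Notes on version B (the rewrite author's own statement) =====
-- stated objective: alternative
-- what changed: Replaces A's single while-loop that mutates a running (x,y) pair and compares it to the endpoint each iteration with a staged construction: the x-coordinates and y-coordinates are generated independently (a directed range, or a repeated constant on a degenerate axis), then zipped and the start point sliced off.
import Mathlib
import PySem

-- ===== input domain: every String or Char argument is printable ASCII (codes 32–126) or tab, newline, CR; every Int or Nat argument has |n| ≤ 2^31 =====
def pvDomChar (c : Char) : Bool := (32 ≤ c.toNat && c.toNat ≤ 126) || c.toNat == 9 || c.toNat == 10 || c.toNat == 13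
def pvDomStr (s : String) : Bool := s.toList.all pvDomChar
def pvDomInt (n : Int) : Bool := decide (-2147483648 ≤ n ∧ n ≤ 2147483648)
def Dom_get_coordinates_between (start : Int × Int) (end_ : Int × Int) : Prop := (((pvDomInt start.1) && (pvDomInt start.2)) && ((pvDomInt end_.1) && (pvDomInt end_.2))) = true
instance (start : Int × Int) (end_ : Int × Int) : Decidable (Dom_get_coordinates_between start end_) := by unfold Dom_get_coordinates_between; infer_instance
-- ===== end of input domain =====

-- B replaces A's single while-loop over a running (x,y) pair with two independently
-- generated coordinate sequences (directed ranges, or a repeated constant) that are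
-- zipped and sliced; same value everywhere (objective: alternative decomposition).

-- ===== PORT A =====
-- A's while-loop: appends (x,y) and steps until (x,y) = (end_x,end_y). Fuel only makes
-- the recursion total; on every input the guard admits, the fuel max(|dx|,|dy|) is
-- ample (the loop stops by its own condition first), so this is exact.
def pvLoopA (step_x step_y ex ey : Int) : Nat → Int → Int → List (Int × Int)
  | 0, _, _ => []
  | f + 1, x, y =>
    if x ≠ ex ∨ y ≠ ey then (x, y) :: pvLoopA step_x step_y ex ey f (x + step_x) (y + step_y)
    else []

def get_coordinates_between (start : Int × Int) (end_ : Int × Int) : Option (List (Int × Int)) :=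
  let start_x := start.1; let start_y := start.2
  let end_x := end_.1; let end_y := end_.2
  let dx := end_x - start_x
  let dy := end_y - start_y
  if |dx| ≠ |dy| ∧ dx ≠ 0 ∧ dy ≠ 0 then none
  else
    let step_x : Int := if dx > 0 then 1 else if dx < 0 then -1 else 0
    let step_y : Int := if dy > 0 then 1 else if dy < 0 then -1 else 0
    some (pvLoopA step_x step_y end_x end_y (max dx.natAbs dy.natAbs)
            (start_x + step_x) (start_y + step_y))

-- ===== PORT B =====
-- Source B: xs = range(start_x, end_x, ±1) or [start_x]*n; ys likewise; list(zip(xs, ys))[1:].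
def get_coordinates_between_alt (start : Int × Int) (end_ : Int × Int) : Option (List (Int × Int)) :=
  let start_x := start.1; let start_y := start.2
  let end_x := end_.1; let end_y := end_.2
  let dx := end_x - start_x
  let dy := end_y - start_y
  if |dx| ≠ |dy| ∧ dx ≠ 0 ∧ dy ≠ 0 then none
  else
    let n : Nat := (max |dx| |dy|).toNat
    let xs : List Int :=
      if dx ≠ 0 then PySem.List.pyRange start_x end_x (if dx > 0 then 1 else -1)
      else List.replicate n start_x
    let ys : List Int :=
      if dy ≠ 0 then PySem.List.pyRange start_y end_y (if dy > 0 then 1 else -1)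
      else List.replicate n start_y
    some (PySem.List.slice (List.zip xs ys) (some 1) none)

-- ===== PRECONDITION & SPEC =====
def Spec_get_coordinates_between (start : Int × Int) (end_ : Int × Int) (out : Option (List (Int × Int))) : Prop := out = get_coordinates_between_alt start end_
instance (start : Int × Int) (end_ : Int × Int) (out : Option (List (Int × Int))) : Decidable (Spec_get_coordinates_between start end_ out) := by unfold Spec_get_coordinates_between; infer_instance

-- ===== CLAIM (what is proved, stated in full; the proofs are below) =====
def Claim_equal_get_coordinates_between : Prop := ∀ (start : Int × Int) (end_ : Int × Int), Dom_get_coordinates_between start end_ → Spec_get_coordinates_between start end_ (get_coordinates_between start end_)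

-- ===== LEMMAS AND PROOFS =====

-- A's loop, started k steps before the endpoint with enough fuel and a nonzero step,
-- emits exactly the k offset points.
theorem pvLoopA_eq (step_x step_y : Int) (hstep : step_x ≠ 0 ∨ step_y ≠ 0) :
    ∀ (k f : Nat) (x y : Int), k ≤ f →
      pvLoopA step_x step_y (x + k * step_x) (y + k * step_y) f x y =
        (List.range k).map (fun (i : Nat) => (x + (i : Int) * step_x, y + (i : Int) * step_y)) := by
  intro k
  induction k with
  | zero =>
    intro f x y _
    cases f with
    | zero => simp [pvLoopA]
    | succ f => simp [pvLoopA]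
  | succ k ih =>
    intro f x y hkf
    cases f with
    | zero => omega
    | succ f =>
      have hcond : x ≠ x + (k + 1 : Nat) * step_x ∨ y ≠ y + (k + 1 : Nat) * step_y := by
        rcases hstep with h | h
        · left
          have : ((k : Int) + 1) * step_x ≠ 0 := by
            apply mul_ne_zero _ h; omega
          push_cast; omega
        · right
          have : ((k : Int) + 1) * step_y ≠ 0 := by
            apply mul_ne_zero _ h; omega
          push_cast; omega
      have hx : x + (↑(k + 1) : Int) * step_x = (x + step_x) + (k : Int) * step_x := by
        push_cast; ring
      have hy : y + (↑(k + 1) : Int) * step_y = (y + step_y) + (k : Int) * step_y := by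
        push_cast; ring
      rw [pvLoopA, if_pos hcond, hx, hy, ih f (x + step_x) (y + step_y) (by omega),
        List.range_succ_eq_map, List.map_cons, List.map_map]
      refine List.cons_eq_cons.mpr ⟨?_, ?_⟩
      · simp
      · apply List.map_congr_left
        intro i _
        simp only [Function.comp_apply, Prod.mk.injEq]
        push_cast
        constructor <;> ring

-- ===== VERDICT (by name: the statement is the Claim_ definition above) =====
theorem get_coordinates_between_spec : Claim_equal_get_coordinates_between := by
  intro start end_ _
  unfold Spec_get_coordinates_between get_coordinates_between get_coordinates_between_alt
  dsimp only
  set sx := start.1 with hsx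
  set sy := start.2 with hsy
  set dx := end_.1 - start.1 with hdx
  set dy := end_.2 - start.2 with hdy
  by_cases hguard : |dx| ≠ |dy| ∧ dx ≠ 0 ∧ dy ≠ 0
  · rw [if_pos hguard, if_pos hguard]
  · rw [if_neg hguard, if_neg hguard]
    set step_x : Int := if dx > 0 then 1 else if dx < 0 then -1 else 0 with hsxdef
    set step_y : Int := if dy > 0 then 1 else if dy < 0 then -1 else 0 with hsydef
    set m : Int := max |dx| |dy| with hm
    have hguard' : |dx| = |dy| ∨ dx = 0 ∨ dy = 0 := by
      by_contra hc
      simp only [not_or] at hc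
      exact hguard ⟨hc.1, hc.2.1, hc.2.2⟩
    have habsx : dx ≠ 0 → |dx| = m := by
      intro h
      rw [hm]
      rcases hguard' with h' | h' | h'
      · rw [h', max_self]
      · exact absurd h' h
      · rw [h', abs_zero, max_eq_left (abs_nonneg dx)]
    have habsy : dy ≠ 0 → |dy| = m := by
      intro h
      rw [hm]
      rcases hguard' with h' | h' | h'
      · rw [h', max_self]
      · rw [h', abs_zero, max_eq_right (abs_nonneg dy)]
      · exact absurd h' h
    -- the sequence of x-coordinates B zips is the offset map, and likewise for y
    have hxs : (if dx ≠ 0 then PySem.List.pyRange sx end_.1 (if dx > 0 then 1 else -1)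
          else List.replicate m.toNat sx) =
        (List.range m.toNat).map (fun (i : Nat) => sx + (i : Int) * step_x) := by
      rcases lt_trichotomy dx 0 with h | h | h
      · have hs : step_x = -1 := by rw [hsxdef, if_neg (by omega), if_pos h]
        rw [if_pos (by omega : dx ≠ 0), if_neg (by omega : ¬ dx > 0),
          PySem.List.pyRange_neg_one]
        have h1 : sx - end_.1 = m := by
          have := habsx (by omega); rw [abs_of_neg (show dx < 0 from h)] at this; omega
        rw [h1, hs]
        apply List.map_congr_left; intro i _; ring
      · have hs : step_x = 0 := by rw [hsxdef]; simp [h]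
        rw [if_neg (by omega), hs]
        simp
      · have hs : step_x = 1 := by rw [hsxdef, if_pos h]
        rw [if_pos (by omega : dx ≠ 0), if_pos h, PySem.List.pyRange_one]
        have h1 : end_.1 - sx = m := by
          have := habsx (by omega); rw [abs_of_pos (show 0 < dx from h)] at this; omega
        rw [h1, hs]
        apply List.map_congr_left; intro i _; ring
    have hys : (if dy ≠ 0 then PySem.List.pyRange sy end_.2 (if dy > 0 then 1 else -1)
          else List.replicate m.toNat sy) =
        (List.range m.toNat).map (fun (i : Nat) => sy + (i : Int) * step_y) := by
      rcases lt_trichotomy dy 0 with h | h | h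
      · have hs : step_y = -1 := by rw [hsydef, if_neg (by omega), if_pos h]
        rw [if_pos (by omega : dy ≠ 0), if_neg (by omega : ¬ dy > 0),
          PySem.List.pyRange_neg_one]
        have h1 : sy - end_.2 = m := by
          have := habsy (by omega); rw [abs_of_neg (show dy < 0 from h)] at this; omega
        rw [h1, hs]
        apply List.map_congr_left; intro i _; ring
      · have hs : step_y = 0 := by rw [hsydef]; simp [h]
        rw [if_neg (by omega), hs]
        simp
      · have hs : step_y = 1 := by rw [hsydef, if_pos h]
        rw [if_pos (by omega : dy ≠ 0), if_pos h, PySem.List.pyRange_one]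
        have h1 : end_.2 - sy = m := by
          have := habsy (by omega); rw [abs_of_pos (show 0 < dy from h)] at this; omega
        rw [h1, hs]
        apply List.map_congr_left; intro i _; ring
    rw [hxs, hys, List.zip_map', PySem.List.slice_from_one]
    by_cases hzero : dx = 0 ∧ dy = 0
    · obtain ⟨h1, h2⟩ := hzero
      have hx0 : step_x = 0 := by rw [hsxdef]; simp [h1]
      have hy0 : step_y = 0 := by rw [hsydef]; simp [h2]
      have hm0 : m = 0 := by rw [hm, h1, h2]; simp
      have hex : end_.1 = sx := by omega
      have hey : end_.2 = sy := by omega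
      have hf0 : max dx.natAbs dy.natAbs = 0 := by rw [h1, h2]; rfl
      rw [hex, hey, hm0, hf0]
      simp [pvLoopA]
    · -- nondegenerate: m ≥ 1, end = start + m·step
      have hstep : step_x ≠ 0 ∨ step_y ≠ 0 := by
        rcases not_and_or.mp hzero with h | h
        · left
          rw [hsxdef]
          rcases lt_trichotomy dx 0 with h' | h' | h' <;> simp [h'] <;> omega
        · right
          rw [hsydef]
          rcases lt_trichotomy dy 0 with h' | h' | h' <;> simp [h'] <;> omega
      have hdxe : dx = |dx| * step_x := by
        rw [hsxdef]
        rcases lt_trichotomy dx 0 with h | h | h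
        · rw [if_neg (by omega), if_pos h, abs_of_neg h]; ring
        · simp [h]
        · rw [if_pos h, abs_of_pos h]; ring
      have hdye : dy = |dy| * step_y := by
        rw [hsydef]
        rcases lt_trichotomy dy 0 with h | h | h
        · rw [if_neg (by omega), if_pos h, abs_of_neg h]; ring
        · simp [h]
        · rw [if_pos h, abs_of_pos h]; ring
      have heq1 : dx = m * step_x := by
        rw [hm]
        rcases hguard' with h | h | h
        · rw [h, max_self, ← h]; exact hdxe
        · have : step_x = 0 := by rw [hsxdef]; simp [h]
          rw [h, this, mul_zero]
        · rw [h]; simp only [abs_zero]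
          rw [max_eq_left (abs_nonneg dx)]; exact hdxe
      have heq2 : dy = m * step_y := by
        rw [hm]
        rcases hguard' with h | h | h
        · rw [h, max_self]; exact hdye
        · rw [h]; simp only [abs_zero]
          rw [max_eq_right (abs_nonneg dy)]; exact hdye
        · have : step_y = 0 := by rw [hsydef]; simp [h]
          rw [h, this, mul_zero]
      have hm1 : 1 ≤ m := by
        rcases not_and_or.mp hzero with h | h
        · have := abs_pos.mpr h; rw [hm]; omega
        · have := abs_pos.mpr h; rw [hm]; omega
      have hfuelN : (max dx.natAbs dy.natAbs : Int) = m := by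
        rw [hm]; simp
      have hk : ((m - 1).toNat : Int) = m - 1 := by omega
      have hle : (m - 1).toNat ≤ max dx.natAbs dy.natAbs := by omega
      have hex : end_.1 = (sx + step_x) + ((m - 1).toNat : Int) * step_x := by
        rw [hk]; linear_combination heq1
      have hey : end_.2 = (sy + step_y) + ((m - 1).toNat : Int) * step_y := by
        rw [hk]; linear_combination heq2
      rw [hex, hey, pvLoopA_eq step_x step_y hstep (m - 1).toNat
        (max dx.natAbs dy.natAbs) (sx + step_x) (sy + step_y) hle]
      -- tail of the m-point map is the (m-1)-point shifted map
      have hmsucc : m.toNat = (m - 1).toNat + 1 := by omega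
      rw [hmsucc, List.range_succ_eq_map, List.map_cons, List.tail_cons, List.map_map]
      refine congrArg some ?_
      apply List.map_congr_left
      intro i _
      simp only [Function.comp_apply, Prod.mk.injEq]
      push_cast
      constructor <;> ring
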